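-- pv_equiv track=rewrite | github.com/StevenUST/GuanDanZero | utils_deal_with_three_with_two.py | remove_k_cards2
-- ===== SOURCE A (Python) =====
-- from typing import Dict, List
-- from copy import deepcopy
--
-- def remove_k_cards2(cards: Dict[str, int], excluded_cards: list[str], target_value: str, remove_count: int) -> Dict[str, int]:
--     # 复制原来的手牌字典
--     updated_cards = deepcopy(cards)
--
--     # 先从非 excluded_cards 中移除指定数量的 K 牌
--     for card in updated_cards.keys():
--         # 检查是否为非排除牌且是 K
--         if card not in excluded_cards and card[1:] == target_value:
--             if updated_cards[card] >= remove_count: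
--                 updated_cards[card] -= remove_count
--                 return updated_cards  # 如果足够移除，直接返回结果
--             else:
--                 remove_count -= updated_cards[card]  # 如果不足，移除所有并减少计数
--                 updated_cards[card] = 0
--
--     # 如果非 excluded_cards 中不足，则从 excluded_cards 中移除剩余数量的 K 牌
--     for card in excluded_cards:
--         if card in updated_cards and card[1:] == target_value:  # 确保卡片存在并且是 K
--             if updated_cards[card] >= remove_count:
--                 updated_cards[card] -= remove_count
--                 return updated_cards  # 移除剩余的数量后返回结果
--             else:
--                 remove_count -= updated_cards[card]  # 如果不足，移除所有并减少计数
--                 updated_cards[card] = 0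
--
--     return updated_cards
-- ===== SOURCE B (Python) =====
-- def remove_k_cards2(cards, excluded_cards, target_value, remove_count):
--     result = dict(cards)
--
--     # Ordered candidate list: non-excluded matching cards first, then the
--     # excluded ones that are present and match (each card listed once).
--     order = [c for c in result if c not in excluded_cards and c[1:] == target_value]
--     for c in excluded_cards:
--         if c in result and c[1:] == target_value and c not in order:
--             order.append(c)
--
--     # Find the pivot: the first candidate at which the running total of held
--     # copies reaches remove_count (no mutation during the search).
--     total = 0
--     pivot = len(order)
--     for i, c in enumerate(order):
--         total += result[c]
--         if total >= remove_count:
--             pivot = i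
--             break
--
--     # Everything before the pivot is emptied; the pivot keeps the surplus.
--     for c in order[:pivot]:
--         result[c] = 0
--     if pivot < len(order):
--         result[order[pivot]] = total - remove_count
--     return result
-- ===== Notes on version B (the rewrite author's own statement) =====
-- stated objective: alternative
-- what changed: A interleaves removal into two sequential mutate-and-early-return loops (dict keys, then excluded cards); B builds the ordered candidate list once, finds the stopping card by a mutation-free running-total (prefix-sum) scan, and then writes the result in one batch (zero the prefix, store the surplus at the pivot).
import Mathlib
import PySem

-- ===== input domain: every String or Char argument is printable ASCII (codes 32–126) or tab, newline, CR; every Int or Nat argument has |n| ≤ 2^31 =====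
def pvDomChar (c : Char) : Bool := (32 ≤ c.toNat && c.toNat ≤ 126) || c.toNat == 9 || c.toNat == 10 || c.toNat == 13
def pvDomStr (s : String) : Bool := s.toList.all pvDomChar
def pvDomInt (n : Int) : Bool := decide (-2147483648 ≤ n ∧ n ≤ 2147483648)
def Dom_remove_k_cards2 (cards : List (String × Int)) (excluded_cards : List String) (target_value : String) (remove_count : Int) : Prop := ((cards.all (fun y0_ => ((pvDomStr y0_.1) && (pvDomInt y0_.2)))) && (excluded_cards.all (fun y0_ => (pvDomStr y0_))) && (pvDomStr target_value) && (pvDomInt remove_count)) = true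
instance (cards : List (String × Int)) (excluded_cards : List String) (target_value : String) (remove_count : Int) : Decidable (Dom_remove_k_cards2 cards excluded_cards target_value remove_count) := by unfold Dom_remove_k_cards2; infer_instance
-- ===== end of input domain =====

-- B removes the two sequential removal loops: it builds the ordered candidate list once,
-- locates the stopping card by a mutation-free running-total (prefix-sum) search, and then
-- writes the result in one batch (zero the prefix, store the surplus at the pivot) — simpler
-- data flow, same exact return value.

-- ===== PORT A =====
-- card[1:] == target_value
def pvTailEq (c tv : String) : Bool := PySem.Str.slice c (some 1) none == tv

-- first loop: over the dict's keys; returns (dict, none) on early return, (dict, some rc) on fall-through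
def pvA_loop1 (ks ex : List String) (tv : String) (d : PySem.Dict String Int) (rc : Int) :
    PySem.Dict String Int × Option Int :=
  match ks with
  | [] => (d, some rc)
  | c :: rest =>
    if !(ex.contains c) && pvTailEq c tv then
      let v := d.getD c 0   -- c is a key of d, so the Python lookup cannot raise
      if v ≥ rc then (d.insert c (v - rc), none)
      else pvA_loop1 rest ex tv (d.insert c 0) (rc - v)
    else pvA_loop1 rest ex tv d rc

-- second loop: over excluded_cards
def pvA_loop2 (exl : List String) (tv : String) (d : PySem.Dict String Int) (rc : Int) :
    PySem.Dict String Int :=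
  match exl with
  | [] => d
  | c :: rest =>
    if d.contains c && pvTailEq c tv then
      let v := d.getD c 0   -- guarded by `card in updated_cards`
      if v ≥ rc then d.insert c (v - rc)
      else pvA_loop2 rest tv (d.insert c 0) (rc - v)
    else pvA_loop2 rest tv d rc

def remove_k_cards2 (cards : List (String × Int)) (excluded_cards : List String) (target_value : String) (remove_count : Int) : List (String × Int) :=
  let d := PySem.Dict.ofList cards
  match pvA_loop1 d.keys excluded_cards target_value d remove_count with
  | (d', none) => d'.items
  | (d', some rc') => (pvA_loop2 excluded_cards target_value d' rc').items

-- ===== PORT B =====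
-- append the matching present excluded cards not already listed
def pvB_ext (exl : List String) (d : PySem.Dict String Int) (tv : String) (order : List String) :
    List String :=
  match exl with
  | [] => order
  | c :: rest =>
    if d.contains c && pvTailEq c tv && !(order.contains c) then
      pvB_ext rest d tv (order ++ [c])
    else pvB_ext rest d tv order

-- running-total pivot search: returns (pivot index, running total); falls off with (length, total)
def pvB_scan (cs : List String) (d : PySem.Dict String Int) (rc : Int) (i : Nat) (total : Int) :
    Nat × Int :=
  match cs with
  | [] => (i, total)
  | c :: rest =>
    let total := total + d.getD c 0
    if total ≥ rc then (i, total) else pvB_scan rest d rc (i + 1) total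

def remove_k_cards2_alt (cards : List (String × Int)) (excluded_cards : List String) (target_value : String) (remove_count : Int) : List (String × Int) :=
  let d := PySem.Dict.ofList cards
  let order := pvB_ext excluded_cards d target_value
      (d.keys.filter (fun c => !(excluded_cards.contains c) && pvTailEq c target_value))
  let pt := pvB_scan order d remove_count 0 0
  let d1 := (order.take pt.1).foldl (fun dd c => dd.insert c 0) d
  let d2 := if h : pt.1 < order.length then d1.insert order[pt.1] (pt.2 - remove_count) else d1
  d2.items

-- ===== PRECONDITION & SPEC =====
def Spec_remove_k_cards2 (cards : List (String × Int)) (excluded_cards : List String) (target_value : String) (remove_count : Int) (out : List (String × Int)) : Prop := out = remove_k_cards2_alt cards excluded_cards target_value remove_count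
instance (cards : List (String × Int)) (excluded_cards : List String) (target_value : String) (remove_count : Int) (out : List (String × Int)) : Decidable (Spec_remove_k_cards2 cards excluded_cards target_value remove_count out) := by unfold Spec_remove_k_cards2; infer_instance

-- ===== CLAIM (what is proved, stated in full; the proofs are below) =====
def Claim_equal_remove_k_cards2 : Prop := ∀ (cards : List (String × Int)) (excluded_cards : List String) (target_value : String) (remove_count : Int), Dom_remove_k_cards2 cards excluded_cards target_value remove_count → Spec_remove_k_cards2 cards excluded_cards target_value remove_count (remove_k_cards2 cards excluded_cards target_value remove_count)

-- ===== LEMMAS AND PROOFS =====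

-- the common one-pass reference process: consume candidates left to right
def pvRun (cs : List String) (d : PySem.Dict String Int) (rc : Int) :
    PySem.Dict String Int × Option Int :=
  match cs with
  | [] => (d, some rc)
  | c :: rest =>
    let v := d.getD c 0
    if v ≥ rc then (d.insert c (v - rc), none)
    else pvRun rest (d.insert c 0) (rc - v)

-- the new candidates pvB_ext appends beyond its accumulator
def pvB_new (exl : List String) (d : PySem.Dict String Int) (tv : String) (acc : List String) :
    List String :=
  match exl with
  | [] => []
  | c :: rest =>
    if d.contains c && pvTailEq c tv && !(acc.contains c) then
      c :: pvB_new rest d tv (acc ++ [c])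
    else pvB_new rest d tv acc

-- B's batch write-back, as a function of the candidate list
def pvWB (cs : List String) (d : PySem.Dict String Int) (rc : Int) : PySem.Dict String Int :=
  let pt := pvB_scan cs d rc 0 0
  let d1 := (cs.take pt.1).foldl (fun dd c => dd.insert c 0) d
  if h : pt.1 < cs.length then d1.insert cs[pt.1] (pt.2 - rc) else d1

-- inserting at an already-present key leaves `contains` unchanged pointwise
theorem pvContains_insert_eq (d : PySem.Dict String Int) (c : String) (v : Int)
    (hcc : d.contains c = true) : ∀ x, (d.insert c v).contains x = d.contains x := by
  intro x
  rw [PySem.Dict.contains_insert]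
  by_cases hx : (x == c) = true
  · have hxc : x = c := by simpa using hx
    simp [hx, hxc, hcc]
  · simp [hx]

theorem pvA1 (ks ex : List String) (tv : String) (d : PySem.Dict String Int) (rc : Int) :
    pvA_loop1 ks ex tv d rc
      = pvRun (ks.filter (fun c => !(ex.contains c) && pvTailEq c tv)) d rc := by
  induction ks generalizing d rc with
  | nil => simp [pvA_loop1, pvRun]
  | cons c rest ih =>
    by_cases hc : (!(ex.contains c) && pvTailEq c tv) = true
    · simp only [pvA_loop1, hc, if_true, List.filter_cons, pvRun]
      split <;> simp_all
    · simp only [pvA_loop1, hc, List.filter_cons]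
      simp only [Bool.not_eq_true] at hc
      simp [ih]

theorem pvA2 (exl : List String) (tv : String) (d : PySem.Dict String Int) (rc : Int) :
    pvA_loop2 exl tv d rc
      = (pvRun (exl.filter (fun c => d.contains c && pvTailEq c tv)) d rc).1 := by
  induction exl generalizing d rc with
  | nil => rfl
  | cons c rest ih =>
    by_cases hc : (d.contains c && pvTailEq c tv) = true
    · have hcc : d.contains c = true := by
        simpa using (Bool.and_eq_true _ _|>.mp hc).1
      simp only [pvA_loop2, hc, if_true, List.filter_cons, pvRun]
      split
      · rfl
      · rw [ih]
        have hfc : rest.filter (fun x => (d.insert c 0).contains x && pvTailEq x tv)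
            = rest.filter (fun x => d.contains x && pvTailEq x tv) := by
          apply List.filter_congr
          intro x _
          rw [pvContains_insert_eq d c 0 hcc x]
        rw [hfc]
    · simp only [pvA_loop2, hc, List.filter_cons]
      simp only [Bool.not_eq_true] at hc
      simp [hc, ih]

theorem pvRun_append (l1 l2 : List String) (d : PySem.Dict String Int) (rc : Int) :
    pvRun (l1 ++ l2) d rc
      = match pvRun l1 d rc with
        | (d', none) => (d', none)
        | (d', some rc') => pvRun l2 d' rc' := by
  induction l1 generalizing d rc with
  | nil => simp [pvRun]
  | cons c rest ih =>
    simp only [List.cons_append, pvRun]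
    split
    · rfl
    · exact ih _ _

theorem pvRun_keys (cs : List String) (d : PySem.Dict String Int) (rc : Int)
    (h : ∀ c ∈ cs, d.contains c = true) :
    (pvRun cs d rc).1.keys = d.keys := by
  induction cs generalizing d rc with
  | nil => rfl
  | cons c rest ih =>
    have hc := h c (by simp)
    simp only [pvRun]
    split
    · exact PySem.Dict.keys_insert_of_contains _ _ hc
    · rw [ih _ _ (fun x hx => ?_), PySem.Dict.keys_insert_of_contains _ _ hc]
      rw [PySem.Dict.contains_insert]
      simp [h x (by simp [hx])]

theorem pvExt_eq_new (exl : List String) (d : PySem.Dict String Int) (tv : String)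
    (acc : List String) :
    pvB_ext exl d tv acc = acc ++ pvB_new exl d tv acc := by
  induction exl generalizing acc with
  | nil => simp [pvB_ext, pvB_new]
  | cons c rest ih =>
    simp only [pvB_ext, pvB_new]
    split
    · rw [ih]; simp
    · exact ih acc

theorem pvNew_congr (exl : List String) (d1 d2 : PySem.Dict String Int) (tv : String)
    (acc : List String) (h : ∀ x, d1.contains x = d2.contains x) :
    pvB_new exl d1 tv acc = pvB_new exl d2 tv acc := by
  induction exl generalizing acc with
  | nil => rfl
  | cons c rest ih =>
    simp only [pvB_new, h c]
    split
    · rw [ih]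
    · exact ih acc

theorem pvInsert_zero_noop (d : PySem.Dict String Int) (c : String)
    (hnd : d.keys.Nodup) (hc : d.contains c = true) (h0 : d.getD c 0 = 0) :
    d.insert c 0 = d := by
  apply PySem.Dict.ext
  rw [PySem.Dict.items_insert_of_contains _ _ hc]
  have hid : ∀ p ∈ d.items, (if (p.1 == c) = true then (c, (0 : Int)) else p) = p := by
    intro p hp
    obtain ⟨k, v⟩ := p
    split
    · rename_i hpc
      have hk : k = c := by simpa using hpc
      subst hk
      have hget : d.get? k = some v := PySem.Dict.get?_of_mem_items _ hp hnd
      have hv : v = 0 := by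
        have := PySem.Dict.getD_of_get?_eq_some d 0 hget
        omega
      simp [hv]
    · rfl
  calc List.map (fun p => if (p.1 == c) = true then (c, (0 : Int)) else p) d.items
      = List.map id d.items := List.map_congr_left (fun p hp => by rw [hid p hp]; rfl)
    _ = d.items := List.map_id _

set_option maxHeartbeats 1000000 in
theorem pvL2E (exl : List String) (tv : String) (d : PySem.Dict String Int) (rc : Int)
    (acc : List String) (hnd : d.keys.Nodup)
    (H : ∀ x ∈ exl, acc.contains x = true → d.contains x = true → pvTailEq x tv = true →
          d.getD x 0 = 0 ∧ 0 < rc) :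
    (pvRun (exl.filter (fun c => d.contains c && pvTailEq c tv)) d rc).1
      = (pvRun (pvB_new exl d tv acc) d rc).1 := by
  induction exl generalizing d rc acc with
  | nil => rfl
  | cons c rest ih =>
    simp only [List.filter_cons, pvB_new]
    by_cases hcond : (d.contains c && pvTailEq c tv) = true
    · obtain ⟨hcc, htv⟩ := Bool.and_eq_true _ _ |>.mp hcond
      by_cases hacc : acc.contains c = true
      · -- duplicate candidate: it holds 0 copies, the run step is a no-op and B skips it
        obtain ⟨h0, hrc⟩ := H c (by simp) hacc hcc htv
        rw [if_pos hcond, if_neg (show ¬ (d.contains c && pvTailEq c tv && !acc.contains c) = true from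
          fun hcontra => by simp at hcontra; exact hcontra.2 (by simpa using hacc))]
        have hstep : pvRun (c :: rest.filter (fun x => d.contains x && pvTailEq x tv)) d rc
            = pvRun (rest.filter (fun x => d.contains x && pvTailEq x tv)) (d.insert c 0) (rc - d.getD c 0) := by
          simp only [pvRun]
          rw [if_neg (by omega)]
        rw [hstep, h0, pvInsert_zero_noop d c hnd hcc h0]
        have : rc - 0 = rc := by ring
        rw [this]
        exact ih d rc acc hnd (fun x hx => H x (by simp [hx]))
      · -- fresh candidate
        have haccm : c ∉ acc := by simpa using hacc
        rw [if_pos hcond, if_pos (by simp [hcond, haccm])]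
        by_cases hge : d.getD c 0 ≥ rc
        · simp [pvRun, hge]
        · have hstep : ∀ L, pvRun (c :: L) d rc = pvRun L (d.insert c 0) (rc - d.getD c 0) := by
            intro L
            simp only [pvRun]
            rw [if_neg hge]
          rw [hstep, hstep]
          have hfc : rest.filter (fun x => d.contains x && pvTailEq x tv)
              = rest.filter (fun x => (d.insert c 0).contains x && pvTailEq x tv) := by
            apply List.filter_congr
            intro x _
            rw [pvContains_insert_eq d c 0 hcc x]
          have hnew : pvB_new rest d tv (acc ++ [c]) = pvB_new rest (d.insert c 0) tv (acc ++ [c]) :=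
            pvNew_congr rest d _ tv _ (fun x => (pvContains_insert_eq d c 0 hcc x).symm)
          rw [hfc, hnew]
          apply ih
          · rw [PySem.Dict.keys_insert_of_contains _ _ hcc]
            exact hnd
          · intro x hx hxacc hxc hxtv
            refine ⟨?_, by omega⟩
            by_cases hxceq : x = c
            · subst hxceq
              exact PySem.Dict.getD_insert_self _ _ _ _
            · rw [PySem.Dict.getD_insert_of_ne _ _ _ hxceq]
              have hxacc' : acc.contains x = true := by
                simp only [List.contains_eq_mem, List.mem_append, List.mem_singleton,
                  decide_eq_true_eq] at hxacc ⊢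
                tauto
              have hxc' : d.contains x = true := by
                rw [pvContains_insert_eq d c 0 hcc x] at hxc
                exact hxc
              exact (H x (by simp [hx]) hxacc' hxc' hxtv).1
    · rw [if_neg hcond, if_neg (by simp [hcond])]
      exact ih d rc acc hnd (fun x hx => H x (by simp [hx]))

theorem pvScan_shift (cs : List String) (d : PySem.Dict String Int) (rc : Int) (i : Nat)
    (t : Int) :
    pvB_scan cs d rc i t
      = ((pvB_scan cs d (rc - t) 0 0).1 + i, (pvB_scan cs d (rc - t) 0 0).2 + t) := by
  induction cs generalizing rc i t with
  | nil => simp [pvB_scan]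
  | cons c rest ih =>
    simp only [pvB_scan, ge_iff_le]
    by_cases hstop : rc ≤ t + d.getD c 0
    · rw [if_pos hstop, if_pos (show rc - t ≤ 0 + d.getD c 0 by omega)]
      simp only [Prod.mk.injEq]
      constructor <;> omega
    · rw [if_neg hstop, if_neg (show ¬ rc - t ≤ 0 + d.getD c 0 by omega)]
      rw [ih rc (i + 1) (t + d.getD c 0), ih (rc - t) 1 (0 + d.getD c 0)]
      have harith : rc - (t + d.getD c 0) = rc - t - (0 + d.getD c 0) := by ring
      rw [harith]
      simp only [Prod.mk.injEq]
      constructor <;> omega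

theorem pvScan_congr (cs : List String) (d1 d2 : PySem.Dict String Int) (rc : Int) (i : Nat)
    (t : Int) (h : ∀ x ∈ cs, d1.getD x 0 = d2.getD x 0) :
    pvB_scan cs d1 rc i t = pvB_scan cs d2 rc i t := by
  induction cs generalizing d1 d2 i t with
  | nil => rfl
  | cons c rest ih =>
    have hc := h c (by simp)
    simp only [pvB_scan, hc]
    split
    · rfl
    · exact ih _ _ _ _ (fun x hx => h x (by simp [hx]))

theorem pvRun_eq_WB (cs : List String) (d : PySem.Dict String Int) (rc : Int)
    (hnd : cs.Nodup) :
    (pvRun cs d rc).1 = pvWB cs d rc := by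
  induction cs generalizing d rc with
  | nil => simp [pvRun, pvWB, pvB_scan]
  | cons c rest ih =>
    obtain ⟨hcr, hnr⟩ := List.nodup_cons.mp hnd
    simp only [pvRun]
    by_cases hge : d.getD c 0 ≥ rc
    · rw [if_pos hge]
      have hscan0 : pvB_scan (c :: rest) d rc 0 0 = (0, 0 + d.getD c 0) := by
        simp only [pvB_scan]
        rw [if_pos (show rc ≤ 0 + d.getD c 0 by omega)]
      simp only [pvWB, hscan0]
      rw [dif_pos (show (0 : Nat) < (c :: rest).length by simp)]
      simp only [List.take_zero, List.foldl_nil, List.getElem_cons_zero]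
      congr 1
      ring
    · rw [if_neg hge]
      rw [ih _ _ hnr]
      have hscan : pvB_scan (c :: rest) d rc 0 0
          = ((pvB_scan rest (d.insert c 0) (rc - d.getD c 0) 0 0).1 + 1,
             (pvB_scan rest (d.insert c 0) (rc - d.getD c 0) 0 0).2 + (0 + d.getD c 0)) := by
        have hcg : pvB_scan rest (d.insert c 0) (rc - d.getD c 0) 0 0
            = pvB_scan rest d (rc - d.getD c 0) 0 0 := by
          apply pvScan_congr
          intro x hx
          exact PySem.Dict.getD_insert_of_ne _ _ _ (fun hxc => hcr (hxc ▸ hx))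
        simp only [pvB_scan]
        rw [if_neg (show ¬ (0 + d.getD c 0 ≥ rc) by omega)]
        rw [pvScan_shift rest d rc 1 (0 + d.getD c 0), hcg]
        have : rc - (0 + d.getD c 0) = rc - d.getD c 0 := by ring
        rw [this]
      simp only [pvWB, hscan]
      by_cases hp : (pvB_scan rest (d.insert c 0) (rc - d.getD c 0) 0 0).1 < rest.length
      · rw [dif_pos hp,
            dif_pos (show (pvB_scan rest (d.insert c 0) (rc - d.getD c 0) 0 0).1 + 1
                < (c :: rest).length by simp; omega)]
        simp only [List.take_succ_cons, List.foldl_cons, List.getElem_cons_succ]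
        congr 1
        ring
      · rw [dif_neg hp,
            dif_neg (show ¬ ((pvB_scan rest (d.insert c 0) (rc - d.getD c 0) 0 0).1 + 1
                < (c :: rest).length) by simp; omega)]
        simp only [List.take_succ_cons, List.foldl_cons]

theorem pvExt_nodup (exl : List String) (d : PySem.Dict String Int) (tv : String)
    (acc : List String) (h : acc.Nodup) : (pvB_ext exl d tv acc).Nodup := by
  induction exl generalizing acc with
  | nil => simpa [pvB_ext] using h
  | cons c rest ih =>
    simp only [pvB_ext]
    split
    · rename_i hcond
      have hc : c ∉ acc := by
        intro hmem
        simp [List.contains_eq_mem, hmem] at hcond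
      apply ih
      simp [List.nodup_append, h]
      exact fun a ha hac => hc (hac ▸ ha)
    · exact ih acc h

-- ===== VERDICT (by name: the statement is the Claim_ definition above) =====
theorem remove_k_cards2_spec : Claim_equal_remove_k_cards2 := by
  intro cards ex tv rc _hdom
  show remove_k_cards2 cards ex tv rc = remove_k_cards2_alt cards ex tv rc
  have hnk : (PySem.Dict.ofList cards).keys.Nodup := PySem.Dict.nodup_keys_ofList cards
  set d0 := PySem.Dict.ofList cards with hd0
  set cand1 := d0.keys.filter (fun c => !(ex.contains c) && pvTailEq c tv) with hc1
  have hsub : ∀ c ∈ cand1, d0.contains c = true := by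
    intro c hcmem
    rw [PySem.Dict.contains_iff_mem_keys]
    exact List.mem_of_mem_filter hcmem
  have hc1nd : cand1.Nodup := hnk.filter _
  have hordnd : (pvB_ext ex d0 tv cand1).Nodup := pvExt_nodup ex d0 tv cand1 hc1nd
  have hBrun : remove_k_cards2_alt cards ex tv rc
      = ((pvRun (pvB_ext ex d0 tv cand1) d0 rc).1).items := by
    have hwb : remove_k_cards2_alt cards ex tv rc
        = (pvWB (pvB_ext ex d0 tv cand1) d0 rc).items := rfl
    rw [hwb, ← pvRun_eq_WB _ _ _ hordnd]
  have hext := pvExt_eq_new ex d0 tv cand1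
  have hA : remove_k_cards2 cards ex tv rc
      = (match pvRun cand1 d0 rc with
         | (d', none) => d'.items
         | (d', some rc') => (pvA_loop2 ex tv d' rc').items) := by
    show (match pvA_loop1 d0.keys ex tv d0 rc with
         | (d', none) => d'.items
         | (d', some rc') => (pvA_loop2 ex tv d' rc').items) = _
    rw [pvA1]
  rw [hA, hBrun, hext, pvRun_append]
  rcases hrun : pvRun cand1 d0 rc with ⟨d1, orc⟩
  cases orc with
  | none => rfl
  | some rc1 =>
    have hkeys : d1.keys = d0.keys := by
      have hk := pvRun_keys cand1 d0 rc hsub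
      rw [hrun] at hk
      exact hk
    have hcont : ∀ x, d0.contains x = d1.contains x := by
      intro x
      rw [PySem.Dict.contains_eq_decide_mem_keys, PySem.Dict.contains_eq_decide_mem_keys, hkeys]
    have hnd1 : d1.keys.Nodup := by rw [hkeys]; exact hnk
    show (pvA_loop2 ex tv d1 rc1).items = ((pvRun (pvB_new ex d0 tv cand1) d1 rc1).1).items
    rw [pvA2, pvNew_congr ex d0 d1 tv cand1 hcont]
    congr 1
    apply pvL2E ex tv d1 rc1 cand1 hnd1
    intro x hx hxacc _ _
    exfalso
    have hxc1 : x ∈ cand1 := by simpa using hxacc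
    have hflt : (!(ex.contains x) && pvTailEq x tv) = true := (List.mem_filter.mp hxc1).2
    have hnex : ¬ x ∈ ex := by simpa using (Bool.and_eq_true _ _ |>.mp hflt).1
    exact hnex hx
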